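-- pv_equiv track=rewrite | github.com/sagemath/sage | src/sage/combinat/crystals/key_crystals.py | _check_content
-- ===== SOURCE A (Python) =====
-- def _check_content(data):
--     """
--     Check the content of ``data`` is an element of ``self``, where
--     we assume that ``data`` is a filling of ``self._shape`` with
--     with distinct entries in the columns.
--     """
--     # Check rows are weakly decreasing
--     for row in data:
--         if any(row[i] < row[i+1] for i in range(len(row)-1)):
--             return False
--
--     # Check the other condition
--     for ind, row in enumerate(data):
--         for ri, k in enumerate(row):
--             i = max((row[ri] for row in data[ind+1:] if len(row) > ri and row[ri] < k), default=None)
--             if i is None: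
--                 continue
--             if ri == len(row) - 1 or i >= row[ri+1]:
--                 return False
--
--     # Check the semistandard condition
--     return all(not row or row[0] <= i for i, row in enumerate(data, start=1))
-- ===== SOURCE B (Python) =====
-- def _check_content(data):
--     # Rows weakly decreasing (adjacent-pair test).
--     for row in data:
--         for a, b in zip(row, row[1:]):
--             if a < b:
--                 return False
--     # Semistandard condition.
--     for i, row in enumerate(data):
--         if row and row[0] > i + 1:
--             return False
--     # Column condition: one bottom-to-top pass, keeping for each column the
--     # list of values seen below; a cell (row, ri) fails iff some below-value v
--     # in its column satisfies v < row[ri] and (ri is last or row[ri+1] <= v).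
--     cols = {}
--     for row in reversed(data):
--         for ri, k in enumerate(row):
--             vals = cols.get(ri, [])
--             if ri == len(row) - 1:
--                 if any(v < k for v in vals):
--                     return False
--             else:
--                 nxt = row[ri + 1]
--                 if any(nxt <= v < k for v in vals):
--                     return False
--         for ri, k in enumerate(row):
--             cols[ri] = [k] + cols.get(ri, [])
--     return True
-- ===== Notes on version B (the rewrite author's own statement) =====
-- stated objective: alternative
-- what changed: Replaces the per-cell slice of all lower rows plus max-with-default by a single bottom-to-top pass that accumulates per-column value lists in a dict and tests each cell with a direct range-existence check; the row and semistandard checks become adjacent-pair zip and shifted-enumerate forms.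
import Mathlib
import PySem

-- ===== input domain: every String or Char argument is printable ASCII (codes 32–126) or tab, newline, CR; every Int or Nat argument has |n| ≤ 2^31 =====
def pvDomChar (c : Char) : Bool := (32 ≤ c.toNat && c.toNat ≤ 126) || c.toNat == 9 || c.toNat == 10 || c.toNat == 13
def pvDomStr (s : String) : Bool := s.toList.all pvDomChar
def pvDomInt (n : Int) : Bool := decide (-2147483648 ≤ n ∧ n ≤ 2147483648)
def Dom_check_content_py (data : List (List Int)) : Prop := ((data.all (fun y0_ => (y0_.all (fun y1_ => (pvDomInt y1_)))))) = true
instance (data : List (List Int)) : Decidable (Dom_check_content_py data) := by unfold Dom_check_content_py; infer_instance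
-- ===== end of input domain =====

-- B replaces A's per-cell slice of all lower rows + max-with-default by one bottom-to-top pass
-- accumulating per-column value lists in a dict with a direct existence test (objective: alternative
-- algorithm of the same worst-case cost).


-- ===== PORT A =====
-- `any(row[i] < row[i+1] for i in range(len(row)-1))`
def aRowBad (row : List Int) : Bool :=
  (PySem.List.pyRange 0 ((row.length : Int) - 1) 1).any (fun i =>
    decide (PySem.List.pyGetD row i 0 < PySem.List.pyGetD row (i + 1) 0))

-- body of the second loop for one cell (ri, k) of `row`; `below` is data[ind+1:]
def aCell (below : List (List Int)) (row : List Int) (ri k : Int) : Bool :=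
  match PySem.List.max? (below.filterMap (fun row2 =>
      if decide (ri < (row2.length : Int)) && decide (PySem.List.pyGetD row2 ri 0 < k)
      then some (PySem.List.pyGetD row2 ri 0) else none)) (fun x => x) with
  | none => true
  | some i => ! (ri == (row.length : Int) - 1 || decide (PySem.List.pyGetD row (ri + 1) 0 ≤ i))

def check_content_py (data : List (List Int)) : Bool :=
  (data.all (fun row => ! aRowBad row))
  && ((PySem.List.enumerate data 0).all (fun p =>
        (PySem.List.enumerate p.2 0).all (fun q =>
          aCell (PySem.List.slice data (some (p.1 + 1)) none) p.2 q.1 q.2)))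
  && ((PySem.List.enumerate data 1).all (fun p =>
        p.2.isEmpty || decide (PySem.List.pyGetD p.2 0 0 ≤ p.1)))

-- ===== PORT B =====
-- `for ri, k in enumerate(row): cols[ri] = [k] + cols.get(ri, [])`
def bAddRow (cols : PySem.Dict Int (List Int)) (row : List Int) : PySem.Dict Int (List Int) :=
  (PySem.List.enumerate row 0).foldl (fun c q => c.insert q.1 (q.2 :: c.getD q.1 [])) cols

-- the column check of one row against the values accumulated from the rows below it
def bRowCheck (cols : PySem.Dict Int (List Int)) (row : List Int) : Bool :=
  (PySem.List.enumerate row 0).all (fun q =>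
    if q.1 == (row.length : Int) - 1 then
      ! (cols.getD q.1 []).any (fun v => decide (v < q.2))
    else
      ! (cols.getD q.1 []).any (fun v =>
          decide (PySem.List.pyGetD row (q.1 + 1) 0 ≤ v) && decide (v < q.2)))

-- `for row in reversed(data): …check…; …accumulate…`
def bGo (rows : List (List Int)) (cols : PySem.Dict Int (List Int)) : Bool :=
  match rows with
  | [] => true
  | row :: rest => bRowCheck cols row && bGo rest (bAddRow cols row)

def check_content_py_alt (data : List (List Int)) : Bool :=
  (data.all (fun row =>
      (row.zip (PySem.List.slice row (some 1) none)).all (fun p => decide (p.2 ≤ p.1))))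
  && ((PySem.List.enumerate data 0).all (fun p =>
        p.2.isEmpty || decide (PySem.List.pyGetD p.2 0 0 ≤ p.1 + 1)))
  && bGo data.reverse PySem.Dict.empty

-- ===== PRECONDITION & SPEC =====
def Spec_check_content_py (data : List (List Int)) (out : Bool) : Prop := out = check_content_py_alt data
instance (data : List (List Int)) (out : Bool) : Decidable (Spec_check_content_py data out) := by unfold Spec_check_content_py; infer_instance

-- ===== CLAIM (what is proved, stated in full; the proofs are below) =====
def Claim_equal_check_content_py : Prop := ∀ (data : List (List Int)), Dom_check_content_py data → Spec_check_content_py data (check_content_py data)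

-- ===== LEMMAS AND PROOFS =====

-- values sitting in column `ri` of the given rows
def colList (rows : List (List Int)) (ri : Nat) : List Int :=
  rows.filterMap (fun r => if ri < r.length then some (r.getD ri 0) else none)

-- the shared meaning of the column condition for one row against a column valuation
def rowOK (f : Nat → List Int) (row : List Int) : Prop :=
  ∀ ri < row.length, ¬ ∃ v ∈ f ri, v < row.getD ri 0 ∧
      (ri = row.length - 1 ∨ row.getD (ri + 1) 0 ≤ v)

lemma mem_colList {rows : List (List Int)} {ri : Nat} {v : Int} :
    v ∈ colList rows ri ↔ ∃ r ∈ rows, ri < r.length ∧ r.getD ri 0 = v := by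
  unfold colList
  simp only [List.mem_filterMap]
  constructor
  · rintro ⟨r, hr, hf⟩
    by_cases h : ri < r.length
    · simp only [if_pos h, Option.some.injEq] at hf
      exact ⟨r, hr, h, hf⟩
    · simp [if_neg h] at hf
  · rintro ⟨r, hr, h, hv⟩
    refine ⟨r, hr, ?_⟩
    rw [if_pos h, hv]

-- ROW CHECK: A's range-any form equals B's zip-all form
lemma row_eq (row : List Int) :
    (! aRowBad row) =
      (row.zip (PySem.List.slice row (some 1) none)).all (fun p => decide (p.2 ≤ p.1)) := by
  rw [PySem.List.slice_from_one]
  have hA : aRowBad row = true ↔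
      ∃ k : Nat, k + 1 < row.length ∧ row.getD k 0 < row.getD (k + 1) 0 := by
    unfold aRowBad
    simp only [List.any_eq_true, PySem.List.mem_pyRange_one, decide_eq_true_eq]
    constructor
    · rintro ⟨i, ⟨h0, h1⟩, hlt⟩
      refine ⟨i.toNat, by omega, ?_⟩
      rw [PySem.List.pyGetD_of_nonneg _ _ h0, PySem.List.pyGetD_of_nonneg _ _ (by omega)] at hlt
      have he : (i + 1).toNat = i.toNat + 1 := by omega
      rwa [he] at hlt
    · rintro ⟨k, hk, hlt⟩
      refine ⟨(k : Int), ⟨by omega, by omega⟩, ?_⟩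
      have h1 : ((k : Int) + 1) = ((k + 1 : Nat) : Int) := by push_cast; ring
      rw [h1, PySem.List.pyGetD_natCast, PySem.List.pyGetD_natCast]
      exact hlt
  have hB : ((row.zip row.tail).all (fun p => decide (p.2 ≤ p.1))) = true ↔
      ∀ k : Nat, k + 1 < row.length → row.getD (k + 1) 0 ≤ row.getD k 0 := by
    simp only [List.all_eq_true, decide_eq_true_eq]
    constructor
    · intro h k hk
      have hz : k < (row.zip row.tail).length := by
        simp only [List.length_zip, List.length_tail]
        omega
      have hm : (row.zip row.tail)[k] ∈ row.zip row.tail := List.getElem_mem hz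
      have := h _ hm
      rw [List.getElem_zip, List.getElem_tail] at this
      rw [List.getD_eq_getElem _ _ (by omega), List.getD_eq_getElem _ _ (by omega)]
      exact this
    · intro h p hp
      obtain ⟨k, hz, rfl⟩ := List.mem_iff_getElem.mp hp
      rw [List.getElem_zip, List.getElem_tail]
      have hk : k + 1 < row.length := by
        simp only [List.length_zip, List.length_tail] at hz
        omega
      have := h k hk
      rwa [List.getD_eq_getElem _ _ (by omega), List.getD_eq_getElem _ _ (by omega)] at this
  rw [Bool.eq_iff_iff, Bool.not_eq_true', Bool.eq_false_iff, hB]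
  constructor
  · intro hfalse k hk
    by_contra hlt
    exact hfalse (hA.mpr ⟨k, hk, by omega⟩)
  · intro h hbad
    obtain ⟨k, hk, hlt⟩ := hA.mp hbad
    have := h k hk
    omega

-- SEMISTANDARD: enumerate from 1 with `≤ i` equals enumerate from 0 with `≤ i+1`
lemma semi_eq (data : List (List Int)) (s : Int) :
    ((PySem.List.enumerate data (s + 1)).all (fun p =>
        p.2.isEmpty || decide (PySem.List.pyGetD p.2 0 0 ≤ p.1)))
    = ((PySem.List.enumerate data s).all (fun p =>
        p.2.isEmpty || decide (PySem.List.pyGetD p.2 0 0 ≤ p.1 + 1))) := by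
  induction data generalizing s with
  | nil => rfl
  | cons r t ih =>
    simp only [PySem.List.enumerate_cons, List.all_cons, ih (s + 1)]

-- A's per-cell check, characterized
lemma aCell_iff (below : List (List Int)) (row : List Int) (ri : Nat) (k : Int)
    (hri : ri < row.length) (hk : row.getD ri 0 = k) :
    aCell below row (ri : Int) k = true ↔
      ¬ ∃ v ∈ colList below ri, v < row.getD ri 0 ∧
          (ri = row.length - 1 ∨ row.getD (ri + 1) 0 ≤ v) := by
  unfold aCell
  have hmemL : ∀ v : Int, v ∈ below.filterMap (fun row2 =>
      if decide ((ri : Int) < (row2.length : Int)) && decide (PySem.List.pyGetD row2 (ri : Int) 0 < k)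
      then some (PySem.List.pyGetD row2 (ri : Int) 0) else none) ↔
      v ∈ colList below ri ∧ v < k := by
    intro v
    simp only [List.mem_filterMap, mem_colList]
    constructor
    · rintro ⟨r, hr, hf⟩
      by_cases h1 : (ri : Int) < (r.length : Int)
      · by_cases h2 : PySem.List.pyGetD r (ri : Int) 0 < k
        · rw [if_pos (by rw [Bool.and_eq_true, decide_eq_true_eq, decide_eq_true_eq]; exact ⟨h1, h2⟩)] at hf
          simp only [Option.some.injEq] at hf
          rw [PySem.List.pyGetD_natCast] at hf h2
          exact ⟨⟨r, hr, by exact_mod_cast h1, hf⟩, hf ▸ h2⟩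
        · rw [if_neg (fun hc => by
            rw [Bool.and_eq_true, decide_eq_true_eq, decide_eq_true_eq] at hc
            exact h2 hc.2)] at hf
          cases hf
      · rw [if_neg (fun hc => by
          rw [Bool.and_eq_true, decide_eq_true_eq, decide_eq_true_eq] at hc
          exact h1 hc.1)] at hf
        cases hf
    · rintro ⟨⟨r, hr, hlen, hv⟩, hvk⟩
      refine ⟨r, hr, ?_⟩
      have h1 : (ri : Int) < (r.length : Int) := by exact_mod_cast hlen
      have h2 : PySem.List.pyGetD r (ri : Int) 0 < k := by
        rw [PySem.List.pyGetD_natCast, hv]; exact hvk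
      rw [if_pos (by rw [Bool.and_eq_true, decide_eq_true_eq, decide_eq_true_eq]; exact ⟨h1, h2⟩)]
      rw [PySem.List.pyGetD_natCast, hv]
  rcases hmax : PySem.List.max? (below.filterMap (fun row2 =>
      if decide ((ri : Int) < (row2.length : Int)) && decide (PySem.List.pyGetD row2 (ri : Int) 0 < k)
      then some (PySem.List.pyGetD row2 (ri : Int) 0) else none)) (fun x => x) with _ | m
  · rw [hmax]
    have hL0 := (PySem.List.max?_eq_none_iff _ _).mp hmax
    simp only [true_iff]
    rintro ⟨v, hv, hvk, _⟩
    have : v ∈ ([] : List Int) := hL0 ▸ (hmemL v).mpr ⟨hv, hk ▸ hvk⟩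
    cases this
  · rw [hmax]
    have hmL := PySem.List.max?_mem hmax
    have hmax' := PySem.List.max?_isMax hmax
    have hnx' : PySem.List.pyGetD row ((ri : Int) + 1) 0 = row.getD (ri + 1) 0 := by
      have : ((ri : Int) + 1) = ((ri + 1 : Nat) : Int) := by push_cast; ring
      rw [this, PySem.List.pyGetD_natCast]
    have hbeq : ((ri : Int) == (row.length : Int) - 1) = decide (ri = row.length - 1) := by
      rw [Bool.eq_iff_iff]
      simp only [beq_iff_eq, decide_eq_true_eq]
      omega
    rw [hbeq, hnx']
    simp only [Bool.not_eq_true', Bool.or_eq_false_iff, decide_eq_false_iff_not]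
    obtain ⟨hm_col, hm_k⟩ := (hmemL m).mp hmL
    constructor
    · rintro ⟨hn1, hn2⟩ ⟨v, hv, hvk, hdisj⟩
      rcases hdisj with h1 | h2
      · exact hn1 h1
      · have hvm : v ≤ m := hmax' v ((hmemL v).mpr ⟨hv, hk ▸ hvk⟩)
        omega
    · intro hne
      constructor
      · intro h1
        exact hne ⟨m, hm_col, hk ▸ hm_k, Or.inl h1⟩
      · intro h2
        exact hne ⟨m, hm_col, hk ▸ hm_k, Or.inr h2⟩

-- A's second loop, characterized
lemma aSecond_iff (data : List (List Int)) :
    ((PySem.List.enumerate data 0).all (fun p =>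
        (PySem.List.enumerate p.2 0).all (fun q =>
          aCell (PySem.List.slice data (some (p.1 + 1)) none) p.2 q.1 q.2))) = true ↔
      ∀ ind : Nat, ∀ h : ind < data.length,
        rowOK (fun ri => colList (data.drop (ind + 1)) ri) data[ind] := by
  simp only [List.all_eq_true]
  constructor
  · intro h ind hind ri hri
    have hp := h ((ind : Int), data[ind]) ((PySem.List.mem_enumerate_iff _ _ _).mpr ⟨ind, hind, by simp⟩)
    have hq := hp ((ri : Int), data[ind][ri]) ((PySem.List.mem_enumerate_iff _ _ _).mpr ⟨ri, hri, by simp⟩)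
    simp only at hq
    rw [show ((ind : Int) + 1) = ((ind + 1 : Nat) : Int) by push_cast; ring,
        PySem.List.slice_from_natCast] at hq
    rw [aCell_iff _ _ _ _ hri (List.getD_eq_getElem _ _ hri)] at hq
    exact hq
  · intro h p hp
    obtain ⟨ind, hind, rfl⟩ := (PySem.List.mem_enumerate_iff _ _ _).mp hp
    intro q hq
    obtain ⟨ri, hri, rfl⟩ := (PySem.List.mem_enumerate_iff _ _ _).mp hq
    simp only [zero_add]
    rw [show ((ind : Int) + 1) = ((ind + 1 : Nat) : Int) by push_cast; ring,
        PySem.List.slice_from_natCast]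
    rw [aCell_iff _ _ _ _ hri (List.getD_eq_getElem _ _ hri)]
    exact h ind hind ri hri

-- the accumulated dict after one row
lemma foldl_insert_enum (row : List Int) (s : Int) (cols : PySem.Dict Int (List Int)) (q : Int) :
    (((PySem.List.enumerate row s).foldl
        (fun c q => c.insert q.1 (q.2 :: c.getD q.1 [])) cols).getD q [])
    = if s ≤ q ∧ q < s + row.length then row.getD (q - s).toNat 0 :: cols.getD q []
      else cols.getD q [] := by
  induction row generalizing s cols with
  | nil =>
    simp only [PySem.List.enumerate_nil, List.foldl_nil, List.length_nil]
    rw [if_neg (by omega)]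
  | cons x xs ih =>
    simp only [PySem.List.enumerate_cons, List.foldl_cons, List.length_cons]
    rw [ih]
    by_cases hq : q = s
    · subst hq
      rw [if_neg (by omega), if_pos (by push_cast; omega)]
      simp [PySem.Dict.getD_insert_self]
    · rw [PySem.Dict.getD_insert_of_ne _ _ _ hq]
      split_ifs with h1 h2 h2
      · congr 1
        have hidx : (q - s).toNat = (q - (s + 1)).toNat + 1 := by omega
        rw [hidx, List.getD_cons_succ]
      · exfalso; omega
      · exfalso; omega
      · rfl

lemma bAddRow_getD (cols : PySem.Dict Int (List Int)) (row : List Int) (ri : Nat) :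
    (bAddRow cols row).getD (ri : Int) [] =
      if ri < row.length then row.getD ri 0 :: cols.getD (ri : Int) []
      else cols.getD (ri : Int) [] := by
  unfold bAddRow
  rw [foldl_insert_enum]
  by_cases h : ri < row.length
  · rw [if_pos (by constructor <;> omega), if_pos h]
    simp
  · rw [if_neg (by omega), if_neg h]

-- membership in the accumulated columns
lemma bAcc_mem (rows : List (List Int)) (cols : PySem.Dict Int (List Int)) (ri : Nat) (v : Int) :
    v ∈ (rows.foldl bAddRow cols).getD (ri : Int) [] ↔
      (∃ r ∈ rows, ri < r.length ∧ r.getD ri 0 = v) ∨ v ∈ cols.getD (ri : Int) [] := by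
  induction rows generalizing cols with
  | nil => simp
  | cons r rs ih =>
    simp only [List.foldl_cons, ih (bAddRow cols r)]
    rw [bAddRow_getD]
    by_cases h : ri < r.length
    · simp only [if_pos h, List.mem_cons]
      constructor
      · rintro (⟨r2, hr2, hl, hv⟩ | (rfl | h2))
        · exact Or.inl ⟨r2, Or.inr hr2, hl, hv⟩
        · exact Or.inl ⟨r, Or.inl rfl, h, rfl⟩
        · exact Or.inr h2
      · rintro (⟨r2, rfl | hr2, hl, hv⟩ | h2)
        · exact Or.inr (Or.inl hv.symm)
        · exact Or.inl ⟨r2, hr2, hl, hv⟩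
        · exact Or.inr (Or.inr h2)
    · simp only [if_neg h]
      constructor
      · rintro (⟨r2, hr2, hl, hv⟩ | h2)
        · exact Or.inl ⟨r2, List.mem_cons_of_mem _ hr2, hl, hv⟩
        · exact Or.inr h2
      · rintro (⟨r2, hr2, hl, hv⟩ | h2)
        · rcases List.mem_cons.mp hr2 with rfl | hr2
          · exact absurd hl h
          · exact Or.inl ⟨r2, hr2, hl, hv⟩
        · exact Or.inr h2

-- B's per-row check, characterized
lemma bRowCheck_iff (cols : PySem.Dict Int (List Int)) (row : List Int) :
    bRowCheck cols row = true ↔ rowOK (fun ri => cols.getD (ri : Int) []) row := by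
  unfold bRowCheck rowOK
  simp only [List.all_eq_true]
  constructor
  · intro h ri hri hex
    obtain ⟨v, hv, hvk, hdisj⟩ := hex
    have hq := h ((ri : Int), row[ri]) ((PySem.List.mem_enumerate_iff _ _ _).mpr ⟨ri, hri, by simp⟩)
    simp only at hq
    have hkge : row.getD ri 0 = row[ri] := List.getD_eq_getElem _ _ hri
    by_cases hlast : ri = row.length - 1
    · rw [if_pos (by simp; omega)] at hq
      rw [Bool.not_eq_true', List.any_eq_false] at hq
      have := hq v hv
      simp only [decide_eq_true_eq] at this
      rw [hkge] at hvk
      simp at this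
      omega
    · rw [if_neg (by simp; omega)] at hq
      rw [Bool.not_eq_true', List.any_eq_false] at hq
      have := hq v hv
      rcases hdisj with rfl | hnx
      · exact hlast rfl
      · have hnx' : PySem.List.pyGetD row ((ri : Int) + 1) 0 = row.getD (ri + 1) 0 := by
          have : ((ri : Int) + 1) = ((ri + 1 : Nat) : Int) := by push_cast; ring
          rw [this, PySem.List.pyGetD_natCast]
        rw [hkge] at hvk
        simp only [hnx', Bool.and_eq_true, decide_eq_true_eq, not_and] at this
        omega
  · intro h q hq
    obtain ⟨ri, hri, rfl⟩ := (PySem.List.mem_enumerate_iff _ _ _).mp hq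
    simp only [zero_add]
    have hnone := h ri hri
    have hkge : row.getD ri 0 = row[ri] := List.getD_eq_getElem _ _ hri
    by_cases hlast : ri = row.length - 1
    · rw [if_pos (by simp; omega)]
      rw [Bool.not_eq_true', List.any_eq_false]
      intro v hv
      simp only [decide_eq_true_eq]
      exact fun hvk => hnone ⟨v, hv, by rw [hkge]; exact hvk, Or.inl hlast⟩
    · rw [if_neg (by simp; omega)]
      rw [Bool.not_eq_true', List.any_eq_false]
      intro v hv
      have hnx' : PySem.List.pyGetD row ((ri : Int) + 1) 0 = row.getD (ri + 1) 0 := by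
        have : ((ri : Int) + 1) = ((ri + 1 : Nat) : Int) := by push_cast; ring
        rw [this, PySem.List.pyGetD_natCast]
      simp only [hnx', Bool.and_eq_true, decide_eq_true_eq, not_and]
      intro hle hvk
      exact hnone ⟨v, hv, by rw [hkge]; exact hvk, Or.inr hle⟩


-- B's loop, characterized
lemma bGo_iff (rows : List (List Int)) (cols : PySem.Dict Int (List Int)) :
    bGo rows cols = true ↔
      ∀ j : Nat, ∀ h : j < rows.length,
        bRowCheck ((rows.take j).foldl bAddRow cols) rows[j] = true := by
  induction rows generalizing cols with
  | nil => simp [bGo]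
  | cons r rs ih =>
    simp only [bGo, Bool.and_eq_true, ih (bAddRow cols r)]
    constructor
    · rintro ⟨h0, hrest⟩ j hj
      cases j with
      | zero => simpa using h0
      | succ j =>
        have := hrest j (by simpa using Nat.lt_of_succ_lt_succ hj)
        simpa using this
    · intro h
      refine ⟨by simpa using h 0 (by simp), fun j hj => ?_⟩
      have := h (j + 1) (by simpa using Nat.succ_lt_succ hj)
      simpa using this

lemma rows_eq (l : List (List Int)) :
    (l.all (fun row => ! aRowBad row))
    = (l.all (fun row =>
        (row.zip (PySem.List.slice row (some 1) none)).all (fun p => decide (p.2 ≤ p.1)))) := by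
  induction l with
  | nil => rfl
  | cons r t ih => simp only [List.all_cons, ih, row_eq r]

-- the second parts agree
lemma second_eq (data : List (List Int)) :
    ((PySem.List.enumerate data 0).all (fun p =>
        (PySem.List.enumerate p.2 0).all (fun q =>
          aCell (PySem.List.slice data (some (p.1 + 1)) none) p.2 q.1 q.2)))
    = bGo data.reverse PySem.Dict.empty := by
  rw [Bool.eq_iff_iff, aSecond_iff data, bGo_iff data.reverse PySem.Dict.empty]
  have hlen : data.reverse.length = data.length := List.length_reverse
  constructor
  · intro h j hj
    have hj' : j < data.length := by omega
    rw [bRowCheck_iff]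
    have e1 : data.reverse[j] = data[data.length - 1 - j] := List.getElem_reverse _
    rw [e1]
    intro ri hri hex
    obtain ⟨v, hv, hvk, hdisj⟩ := hex
    rw [bAcc_mem] at hv
    rcases hv with ⟨r, hr, hl, hveq⟩ | hv0
    · have hrd : r ∈ data.drop (data.length - j) := by
        rw [List.take_reverse] at hr
        exact (List.mem_reverse).mp hr
      have hd : data.length - 1 - j + 1 = data.length - j := by omega
      refine h (data.length - 1 - j) (by omega) ri hri ⟨v, ?_, hvk, hdisj⟩
      rw [hd]
      exact mem_colList.mpr ⟨r, hrd, hl, hveq⟩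
    · simp [PySem.Dict.empty, PySem.Dict.getD, PySem.Dict.get?] at hv0
  · intro h ind hind ri hri hex
    obtain ⟨v, hv, hvk, hdisj⟩ := hex
    have hj : data.length - 1 - ind < data.reverse.length := by omega
    have hb := h (data.length - 1 - ind) hj
    rw [bRowCheck_iff] at hb
    have e1 : data.reverse[data.length - 1 - ind] = data[ind] := by
      rw [List.getElem_reverse]
      congr 1
      omega
    rw [e1] at hb
    refine hb ri hri ⟨v, ?_, hvk, hdisj⟩
    rw [bAcc_mem]
    obtain ⟨r, hrd, hl, hveq⟩ := mem_colList.mp hv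
    refine Or.inl ⟨r, ?_, hl, hveq⟩
    rw [List.take_reverse, List.mem_reverse]
    have hd : data.length - (data.length - 1 - ind) = ind + 1 := by omega
    rw [hd]
    exact hrd

-- ===== VERDICT (by name: the statement is the Claim_ definition above) =====
theorem check_content_py_spec : Claim_equal_check_content_py := by
  intro data _
  show check_content_py data = check_content_py_alt data
  unfold check_content_py check_content_py_alt
  rw [second_eq data]
  have hsemi := semi_eq data 0
  norm_num at hsemi
  rw [hsemi]
  rw [rows_eq data]
  cases data.all (fun row =>
      (row.zip (PySem.List.slice row (some 1) none)).all (fun p => decide (p.2 ≤ p.1))) <;>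
    cases bGo data.reverse PySem.Dict.empty <;> simp
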